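-- pv_equiv track=rewrite | github.com/PacktPublishing/Functional-Python-Programming-3rd-Edition | Chapter09/ch09_ex2.py | assignment
-- ===== SOURCE A (Python) =====
-- from itertools import permutations
--
-- def assignment(cost: list[tuple[int, ...]]) -> list[tuple[int, ...]]:
--     n_tasks = len(cost)
--     perms = permutations(range(n_tasks))
--     alt = [
--         (sum(cost[task][agent] for agent, task in enumerate(perm)), perm)
--         for perm in perms
--     ]
--     m = min(alt)[0]
--     return [ans for s, ans in alt if s == m]
-- ===== SOURCE B (Python) =====
-- def assignment(cost: list[tuple[int, ...]]) -> list[tuple[int, ...]]: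
--     n = len(cost)
--     memo = {}
--
--     def best(remaining):
--         # min cost of assigning agents n-len(remaining)..n-1 to the tasks in remaining
--         if not remaining:
--             return 0
--         if remaining in memo:
--             return memo[remaining]
--         agent = n - len(remaining)
--         b = min(cost[t][agent] + best(remaining[:i] + remaining[i + 1:])
--                 for i, t in enumerate(remaining))
--         memo[remaining] = b
--         return b
--
--     def build(remaining):
--         # all optimal suffix assignments, in lexicographic (= itertools) order
--         if not remaining:
--             return [()]
--         agent = n - len(remaining)
--         b = best(remaining)
--         out = []
--         for i, t in enumerate(remaining):
--             rest = remaining[:i] + remaining[i + 1:]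
--             if cost[t][agent] + best(rest) == b:
--                 out.extend((t,) + suffix for suffix in build(rest))
--         return out
--
--     return build(tuple(range(n)))
-- ===== Notes on version B (the rewrite author's own statement) =====
-- stated objective: faster
-- what changed: Replaces A's brute-force enumeration of all n! permutations (build the full (cost, perm) table, take min, filter) by a Held-Karp style dynamic program: the minimal cost of assigning the remaining agents to each subset of tasks is memoized (O(2^n) subproblems), and the optimal permutations are then reconstructed depth-first in lexicographic order, exploring only optimal branches.
import Mathlib
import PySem

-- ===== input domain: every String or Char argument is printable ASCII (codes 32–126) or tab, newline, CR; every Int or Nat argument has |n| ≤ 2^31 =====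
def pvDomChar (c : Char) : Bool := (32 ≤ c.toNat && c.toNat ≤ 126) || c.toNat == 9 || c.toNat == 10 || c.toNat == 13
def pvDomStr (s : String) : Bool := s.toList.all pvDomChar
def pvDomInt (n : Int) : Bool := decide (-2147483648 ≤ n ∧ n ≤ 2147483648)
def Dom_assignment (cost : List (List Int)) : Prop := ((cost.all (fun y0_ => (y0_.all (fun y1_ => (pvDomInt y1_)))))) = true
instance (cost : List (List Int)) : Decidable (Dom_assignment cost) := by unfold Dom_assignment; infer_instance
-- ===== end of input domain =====

-- B replaces A's enumeration of all n! permutations by a memoized subset DP for the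
-- minimal cost plus a depth-first reconstruction of the optimal permutations in
-- lexicographic order; equality of the RETURN value on Pre_ is proved below.

-- ===== PORT A =====
-- sum(cost[task][agent] for agent, task in enumerate(perm))
def pvCost (cost : List (List Int)) (perm : List Int) : Int :=
  (PySem.List.enumerate perm 0).foldl
    (fun s at_ => s + PySem.List.pyGetD (PySem.List.pyGetD cost at_.2 []) at_.1 0) 0

def assignment (cost : List (List Int)) : List (List Int) :=
  let nTasks : Int := cost.length
  let rng := PySem.List.pyRange 0 nTasks 1
  let perms := PySem.List.permutations rng rng.length
  let alt := perms.map (fun perm => (pvCost cost perm, perm))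
  match PySem.List.min2? alt (fun sp => sp.1) (fun sp => sp.2) with
  | none => []   -- unreachable: alt always holds at least one permutation
  | some mn => (alt.filter (fun sp => sp.1 == mn.1)).map (fun sp => sp.2)

-- ===== PORT B =====
-- cost[t][agent]
def pvC (cost : List (List Int)) (t a : Int) : Int :=
  PySem.List.pyGetD (PySem.List.pyGetD cost t []) a 0

-- best(remaining): memoized minimal cost of assigning agents n-|remaining| .. n-1 to
-- the tasks of `remaining`; the memo dict is threaded through explicitly.  The Nat
-- `fuel` argument (always ≥ |remaining| at every call) is only a totality guard for
-- the recursion; bvalsF is the generator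
-- `(cost[t][agent] + best(remaining[:i]+remaining[i+1:]) for i, t in enumerate(remaining))`.
def bvalsF (cost : List (List Int)) (n : Int)
    (best : List Int → PySem.Dict (List Int) Int → Int × PySem.Dict (List Int) Int)
    (rem : List Int) :
    List Int → Nat → PySem.Dict (List Int) Int → List Int × PySem.Dict (List Int) Int
  | [], _, memo => ([], memo)
  | t :: ts, i, memo =>
      let q := best (rem.eraseIdx i) memo
      let r := bvalsF cost n best rem ts (i + 1) q.2
      ((pvC cost t (n - (rem.length : Int)) + q.1) :: r.1, r.2)

def bbest (cost : List (List Int)) (n : Int) :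
    Nat → List Int → PySem.Dict (List Int) Int → Int × PySem.Dict (List Int) Int
  | fuel, rem, memo =>
    if rem.isEmpty then (0, memo)
    else
      match fuel with
      | 0 => (0, memo)   -- unreachable: fuel ≥ |remaining| at every call
      | fuel + 1 =>
        match PySem.Dict.get? memo rem with
        | some v => (v, memo)
        | none =>
          let p := bvalsF cost n (bbest cost n fuel) rem rem 0 memo
          let b := match PySem.List.min? p.1 (fun x => x) with
                   | some m => m
                   | none => 0   -- unreachable: rem is nonempty here
          (b, PySem.Dict.insert p.2 rem b)

-- build(remaining): all optimal suffix assignments, depth-first / lexicographic;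
-- boutsF is the loop `for i, t in enumerate(remaining): …` of build.
def boutsF (cost : List (List Int)) (n : Int)
    (best : List Int → PySem.Dict (List Int) Int → Int × PySem.Dict (List Int) Int)
    (build : List Int → PySem.Dict (List Int) Int → List (List Int) × PySem.Dict (List Int) Int)
    (rem : List Int) (b : Int) :
    List Int → Nat → PySem.Dict (List Int) Int → List (List Int) × PySem.Dict (List Int) Int
  | [], _, memo => ([], memo)
  | t :: ts, i, memo =>
      let q := best (rem.eraseIdx i) memo
      let p := if pvC cost t (n - (rem.length : Int)) + q.1 == b
               then build (rem.eraseIdx i) q.2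
               else ([], q.2)
      let r := boutsF cost n best build rem b ts (i + 1) p.2
      (p.1.map (fun s => t :: s) ++ r.1, r.2)

def bbuild (cost : List (List Int)) (n : Int) :
    Nat → List Int → PySem.Dict (List Int) Int → List (List Int) × PySem.Dict (List Int) Int
  | fuel, rem, memo =>
    if rem.isEmpty then ([[]], memo)
    else
      match fuel with
      | 0 => ([], memo)   -- unreachable: fuel ≥ |remaining| at every call
      | fuel + 1 =>
        let q := bbest cost n (fuel + 1) rem memo
        boutsF cost n (bbest cost n fuel) (bbuild cost n fuel) rem q.1 rem 0 q.2

def assignment_alt (cost : List (List Int)) : List (List Int) :=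
  let n : Int := cost.length
  let rng := PySem.List.pyRange 0 n 1
  (bbuild cost n rng.length rng PySem.Dict.empty).1

-- ===== PRECONDITION & SPEC =====
-- Pre_ excludes exactly the inputs on which the Python A raises IndexError: a row of
-- cost shorter than len(cost) is indexed at some agent position ≥ its length.
def Pre_assignment (cost : List (List Int)) : Prop :=
  ∀ row ∈ cost, cost.length ≤ row.length
instance (cost : List (List Int)) : Decidable (Pre_assignment cost) := by
  unfold Pre_assignment; infer_instance
def pvWitness_assignment : List (List Int) := [[1, 2], [2, 1]]

def Spec_assignment (cost : List (List Int)) (out : List (List Int)) : Prop := out = assignment_alt cost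
instance (cost : List (List Int)) (out : List (List Int)) : Decidable (Spec_assignment cost out) := by unfold Spec_assignment; infer_instance

-- ===== CLAIM =====
def Claim_equal_assignment : Prop := ∀ (cost : List (List Int)), Dom_assignment cost → Pre_assignment cost → Spec_assignment cost (assignment cost)

-- ===== LEMMAS AND PROOFS =====

-- pure (memo-free) mirrors of bbest/bvals and bbuild/bouts, used only by the proofs
mutual
def mbest (cost : List (List Int)) (n : Int) (rem : List Int) : Int :=
  if rem.isEmpty then 0
  else
    match PySem.List.min? (mvals cost n rem rem 0 (by simp)) (fun x => x) with
    | some m => m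
    | none => 0

  termination_by (rem.length, 1, 0)
  decreasing_by
    exact Prod.Lex.right _ (Prod.Lex.left _ _ (by omega))

def mvals (cost : List (List Int)) (n : Int) (rem : List Int) (todo : List Int) (i : Nat)
    (h : i + todo.length = rem.length) : List Int :=
  match todo with
  | [] => []
  | t :: ts =>
    (pvC cost t (n - (rem.length : Int)) + mbest cost n (rem.eraseIdx i)) ::
      mvals cost n rem ts (i + 1) (by simp only [List.length_cons] at h; omega)
  termination_by (rem.length, 0, todo.length)
  decreasing_by
    · have hi : i < rem.length := by simp only [List.length_cons] at h; omega
      exact Prod.Lex.left _ _ (by rw [List.length_eraseIdx_of_lt hi]; omega)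
    · exact Prod.Lex.right _ (Prod.Lex.right _ (by simp))

end

mutual
def mbuild (cost : List (List Int)) (n : Int) (rem : List Int) : List (List Int) :=
  if rem.isEmpty then [[]]
  else mouts cost n rem rem 0 (mbest cost n rem) (by simp)

  termination_by (rem.length, 1, 0)
  decreasing_by
    exact Prod.Lex.right _ (Prod.Lex.left _ _ (by omega))

def mouts (cost : List (List Int)) (n : Int) (rem : List Int) (todo : List Int) (i : Nat)
    (b : Int) (h : i + todo.length = rem.length) : List (List Int) :=
  match todo with
  | [] => []
  | t :: ts =>
    (if pvC cost t (n - (rem.length : Int)) + mbest cost n (rem.eraseIdx i) == b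
     then (mbuild cost n (rem.eraseIdx i)).map (fun s => t :: s)
     else []) ++
      mouts cost n rem ts (i + 1) b (by simp only [List.length_cons] at h; omega)
  termination_by (rem.length, 0, todo.length)
  decreasing_by
    · have hi : i < rem.length := by simp only [List.length_cons] at h; omega
      exact Prod.Lex.left _ _ (by rw [List.length_eraseIdx_of_lt hi]; omega)
    · exact Prod.Lex.right _ (Prod.Lex.right _ (by simp))

end

-- suffix cost: cost of a permutation suffix starting at agent a
def scost (cost : List (List Int)) (a : Int) : List Int → Int
  | [] => 0
  | t :: p => pvC cost t a + scost cost (a + 1) p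

-- the value list mvals computes, as a function of the index
def vF (cost : List (List Int)) (n : Int) (rem : List Int) (j : Nat) : Int :=
  pvC cost (rem.getD j 0) (n - (rem.length : Int)) + mbest cost n (rem.eraseIdx j)

-- memo invariant: every stored value is the true subproblem optimum
def MInv (cost : List (List Int)) (n : Int) (memo : PySem.Dict (List Int) Int) : Prop :=
  ∀ k v, memo.get? k = some v → v = mbest cost n k

-- structural unfoldings of PySem.List.permutations
lemma perms_zero {α : Type} (xs : List α) : PySem.List.permutations xs 0 = [[]] := by
  rw [PySem.List.permutations]

lemma perms_succ (xs : List Int) (k : Nat) :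
    PySem.List.permutations xs (k + 1)
      = (List.range xs.length).flatMap
          (fun i => (PySem.List.permutations (xs.eraseIdx i) k).map (fun p => xs.getD i 0 :: p)) := by
  rw [PySem.List.permutations]
  rw [List.flatMap_def, List.flatMap_def]
  congr 1
  apply List.map_congr_left
  intro i hi
  rw [List.mem_range] at hi
  rw [List.getElem?_eq_getElem hi]
  rw [List.getD_eq_getElem?_getD, List.getElem?_eq_getElem hi]
  rfl

-- A's generator sum is the suffix cost from agent 0
lemma enum_foldl_scost (cost : List (List Int)) :
    ∀ (p : List Int) (k s : Int),
      (PySem.List.enumerate p k).foldl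
        (fun s at_ => s + PySem.List.pyGetD (PySem.List.pyGetD cost at_.2 []) at_.1 0) s
      = s + scost cost k p := by
  intro p
  induction p with
  | nil => intro k s; simp [PySem.List.enumerate_nil, scost]
  | cons t q ih =>
      intro k s
      rw [PySem.List.enumerate_cons, List.foldl_cons, ih]
      simp only [scost, pvC]
      ring

lemma pvCost_eq_scost (cost : List (List Int)) (p : List Int) :
    pvCost cost p = scost cost 0 p := by
  simpa using enum_foldl_scost cost p 0 0

-- agent index of the subproblem after removing task i
lemma agent_erase (n : Int) (rem : List Int) (i : Nat) (hi : i < rem.length) :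
    n - ((rem.eraseIdx i).length : Int) = (n - (rem.length : Int)) + 1 := by
  rw [List.length_eraseIdx_of_lt hi]
  have : 1 ≤ rem.length := by omega
  push_cast [this]
  omega

lemma beq_shift (c x y : Int) : (c + x == c + y) = (x == y) := by
  by_cases h : x = y
  · simp [h]
  · simp [h, show c + x ≠ c + y by omega]

lemma mbest_nil (cost : List (List Int)) (n : Int) : mbest cost n [] = 0 := by
  rw [mbest]; rfl

-- mvals, along the suffixes the recursion actually visits, is a map over indices
lemma mvals_eq (cost : List (List Int)) (n : Int) (rem : List Int) :
    ∀ (todo : List Int) (i : Nat) (h : i + todo.length = rem.length)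
      (_hd : todo = rem.drop i),
      mvals cost n rem todo i h = ((List.range rem.length).drop i).map (vF cost n rem) := by
  intro todo
  induction todo with
  | nil =>
      intro i h _
      rw [mvals]
      simp only [List.length_nil] at h
      rw [List.drop_eq_nil_iff.mpr (by rw [List.length_range]; omega)]
      rfl
  | cons t ts ih =>
      intro i h hd
      have hi : i < rem.length := by simp only [List.length_cons] at h; omega
      have hdrop : t :: ts = rem[i] :: rem.drop (i + 1) := hd.trans (List.drop_eq_getElem_cons hi)
      have ht : t = rem[i] := ((List.cons.injEq _ _ _ _).mp hdrop).1
      have hts : ts = rem.drop (i + 1) := ((List.cons.injEq _ _ _ _).mp hdrop).2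
      have hri : i < (List.range rem.length).length := by rw [List.length_range]; exact hi
      rw [mvals]
      rw [List.drop_eq_getElem_cons hri, List.map_cons]
      simp only [List.getElem_range]
      rw [ih (i + 1) (by simp only [List.length_cons] at h; omega) hts]
      simp only [vF, List.getD_eq_getElem?_getD, List.getElem?_eq_getElem hi, ht]
      rfl

-- the optimum of a nonempty subproblem is min over its value list
lemma mbest_min (cost : List (List Int)) (n : Int) (rem : List Int) (hne : rem ≠ []) :
    PySem.List.min? ((List.range rem.length).map (vF cost n rem)) (fun x => x)
      = some (mbest cost n rem) := by
  have hlen : 0 < rem.length := List.length_pos_iff.mpr hne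
  have hie : rem.isEmpty = false := by simp [hne]
  have hnil : (List.range rem.length).map (vF cost n rem) ≠ [] := by
    simp only [ne_eq, List.map_eq_nil_iff, List.range_eq_nil]
    omega
  cases hmin : PySem.List.min? ((List.range rem.length).map (vF cost n rem)) (fun x => x) with
  | none => exact absurd ((PySem.List.min?_eq_none_iff _ _).mp hmin) hnil
  | some m =>
      have hb : mbest cost n rem = m := by
        rw [mbest, hie]
        simp only [Bool.false_eq_true, if_false]
        rw [mvals_eq cost n rem rem 0 (by simp) (by simp), List.drop_zero, hmin]
      rw [hb]

lemma mbest_le_vF (cost : List (List Int)) (n : Int) (rem : List Int) (j : Nat)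
    (hj : j < rem.length) : mbest cost n rem ≤ vF cost n rem j := by
  have hne : rem ≠ [] := by intro h; rw [h] at hj; simp at hj
  exact PySem.List.min?_isMin (mbest_min cost n rem hne) _
    (List.mem_map_of_mem (List.mem_range.mpr hj))

lemma mbest_att_vF (cost : List (List Int)) (n : Int) (rem : List Int) (hne : rem ≠ []) :
    ∃ j, j < rem.length ∧ mbest cost n rem = vF cost n rem j := by
  have hmem := PySem.List.min?_mem (mbest_min cost n rem hne)
  obtain ⟨j, hj, hv⟩ := List.mem_map.mp hmem
  exact ⟨j, List.mem_range.mp hj, hv.symm⟩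

-- mbest is a lower bound on the cost of every permutation of rem
lemma mbest_lb (cost : List (List Int)) (n : Int) :
    ∀ (N : Nat) (rem : List Int), rem.length = N →
      ∀ p ∈ PySem.List.permutations rem rem.length,
        mbest cost n rem ≤ scost cost (n - (rem.length : Int)) p := by
  intro N
  induction N using Nat.strong_induction_on with
  | _ N ih =>
    intro rem hlen p hp
    match N, hlen with
    | 0, hlen =>
        have hnil : rem = [] := List.eq_nil_of_length_eq_zero hlen
        subst hnil
        rw [List.length_nil, perms_zero] at hp
        simp only [List.mem_singleton] at hp
        subst hp
        rw [mbest_nil]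
        simp [scost]
    | (k + 1), hlen =>
        rw [hlen, perms_succ] at hp
        obtain ⟨i, hir, hq⟩ := List.mem_flatMap.mp hp
        obtain ⟨q, hq, hpq⟩ := List.mem_map.mp hq
        rw [List.mem_range] at hir
        have hek : (rem.eraseIdx i).length = k := by
          rw [List.length_eraseIdx_of_lt hir]; omega
        have h1 : mbest cost n (rem.eraseIdx i)
            ≤ scost cost (n - ((rem.eraseIdx i).length : Int)) q := by
          apply ih k (by omega) (rem.eraseIdx i) hek
          rw [hek]; exact hq
        rw [agent_erase n rem i hir] at h1
        have h2 : mbest cost n rem ≤ vF cost n rem i := mbest_le_vF cost n rem i hir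
        rw [vF] at h2
        subst hpq
        simp only [scost]
        omega

-- … and it is attained by some permutation of rem
lemma mbest_att (cost : List (List Int)) (n : Int) :
    ∀ (N : Nat) (rem : List Int), rem.length = N →
      ∃ p ∈ PySem.List.permutations rem rem.length,
        scost cost (n - (rem.length : Int)) p = mbest cost n rem := by
  intro N
  induction N using Nat.strong_induction_on with
  | _ N ih =>
    intro rem hlen
    match N, hlen with
    | 0, hlen =>
        have hnil : rem = [] := List.eq_nil_of_length_eq_zero hlen
        subst hnil
        rw [List.length_nil, perms_zero, mbest_nil]
        exact ⟨[], by simp, by simp [scost]⟩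
    | (k + 1), hlen =>
        have hne : rem ≠ [] := by intro h; rw [h] at hlen; simp at hlen
        obtain ⟨j, hj, hv⟩ := mbest_att_vF cost n rem hne
        have hek : (rem.eraseIdx j).length = k := by
          rw [List.length_eraseIdx_of_lt hj]; omega
        obtain ⟨q, hq, hcq⟩ := ih k (by omega) (rem.eraseIdx j) hek
        refine ⟨rem.getD j 0 :: q, ?_, ?_⟩
        · rw [hlen, perms_succ]
          apply List.mem_flatMap.mpr
          exact ⟨j, List.mem_range.mpr hj, List.mem_map_of_mem (by rw [← hek]; exact hq)⟩
        · rw [agent_erase n rem j hj] at hcq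
          simp only [scost]
          rw [hcq, hv, vF]

-- mouts along the visited suffixes, as a flatMap over indices
lemma mouts_eq (cost : List (List Int)) (n : Int) (rem : List Int) (b : Int) :
    ∀ (todo : List Int) (i : Nat) (h : i + todo.length = rem.length)
      (_hd : todo = rem.drop i),
      mouts cost n rem todo i b h
        = ((List.range rem.length).drop i).flatMap
            (fun j => if vF cost n rem j == b
                      then (mbuild cost n (rem.eraseIdx j)).map (fun s => rem.getD j 0 :: s)
                      else []) := by
  intro todo
  induction todo with
  | nil =>
      intro i h _
      rw [mouts]
      simp only [List.length_nil] at h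
      rw [List.drop_eq_nil_iff.mpr (by rw [List.length_range]; omega)]
      rfl
  | cons t ts ih =>
      intro i h hd
      have hi : i < rem.length := by simp only [List.length_cons] at h; omega
      have hdrop : t :: ts = rem[i] :: rem.drop (i + 1) := hd.trans (List.drop_eq_getElem_cons hi)
      have ht : t = rem[i] := ((List.cons.injEq _ _ _ _).mp hdrop).1
      have hts : ts = rem.drop (i + 1) := ((List.cons.injEq _ _ _ _).mp hdrop).2
      have hri : i < (List.range rem.length).length := by rw [List.length_range]; exact hi
      rw [mouts]
      rw [List.drop_eq_getElem_cons hri, List.flatMap_cons]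
      simp only [List.getElem_range]
      rw [ih (i + 1) (by simp only [List.length_cons] at h; omega) hts]
      have hgd : rem.getD i 0 = t := by
        rw [List.getD_eq_getElem?_getD, List.getElem?_eq_getElem hi, ht]; rfl
      simp only [vF, hgd]

-- the reconstruction returns exactly the minimal-cost permutations, in order
lemma mbuild_eq (cost : List (List Int)) (n : Int) :
    ∀ (N : Nat) (rem : List Int), rem.length = N →
      mbuild cost n rem
        = (PySem.List.permutations rem rem.length).filter
            (fun p => scost cost (n - (rem.length : Int)) p == mbest cost n rem) := by
  intro N
  induction N using Nat.strong_induction_on with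
  | _ N ih =>
    intro rem hlen
    match N, hlen with
    | 0, hlen =>
        have hnil : rem = [] := List.eq_nil_of_length_eq_zero hlen
        subst hnil
        rw [mbuild]
        rw [List.length_nil, perms_zero, mbest_nil]
        simp [scost]
    | (k + 1), hlen =>
        have hne : rem ≠ [] := by intro h0; rw [h0] at hlen; simp at hlen
        have hie : rem.isEmpty = false := by simp [hne]
        rw [mbuild, hie]
        simp only [Bool.false_eq_true, if_false]
        rw [mouts_eq cost n rem (mbest cost n rem) rem 0 (by simp) (by simp), List.drop_zero]
        have hperm : PySem.List.permutations rem rem.length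
            = (List.range rem.length).flatMap
                (fun j => (PySem.List.permutations (rem.eraseIdx j) k).map (fun p => rem.getD j 0 :: p)) := by
          conv_lhs => rw [hlen]
          exact perms_succ rem k
        rw [hperm, List.filter_flatMap]
        rw [List.flatMap_def, List.flatMap_def]
        congr 1
        apply List.map_congr_left
        intro j hj
        rw [List.mem_range] at hj
        have hek : (rem.eraseIdx j).length = k := by rw [List.length_eraseIdx_of_lt hj]; omega
        have hIH : mbuild cost n (rem.eraseIdx j)
            = (PySem.List.permutations (rem.eraseIdx j) k).filter
                (fun q => scost cost ((n - (rem.length : Int)) + 1) q == mbest cost n (rem.eraseIdx j)) := by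
          have := ih k (by omega) (rem.eraseIdx j) hek
          rw [agent_erase n rem j hj, hek] at this
          exact this
        rw [List.filter_map]
        by_cases hc : vF cost n rem j = mbest cost n rem
        · rw [if_pos (beq_iff_eq.mpr hc), hIH]
          congr 1
          apply List.filter_congr
          intro q _
          simp only [Function.comp_apply, scost]
          rw [show mbest cost n rem = vF cost n rem j from hc.symm, vF]
          exact (beq_shift _ _ _).symm
        · rw [if_neg (by simpa using hc)]
          symm
          rw [List.map_eq_nil_iff, List.filter_eq_nil_iff]
          intro q hq hbad
          simp only [Function.comp_apply, scost, beq_iff_eq] at hbad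
          have hlb : mbest cost n (rem.eraseIdx j)
              ≤ scost cost ((n - (rem.length : Int)) + 1) q := by
            have := mbest_lb cost n (rem.eraseIdx j).length (rem.eraseIdx j) rfl q
              (by rw [hek]; exact hq)
            rwa [agent_erase n rem j hj] at this
          have hub : mbest cost n rem ≤ vF cost n rem j := mbest_le_vF cost n rem j hj
          rw [vF] at hub
          have : vF cost n rem j = mbest cost n rem := by rw [vF]; omega
          exact hc this

-- the memoized best agrees with the pure one and preserves the memo invariant
lemma bbest_eq (cost : List (List Int)) (n : Int) :
    ∀ (fuel : Nat) (rem : List Int), rem.length ≤ fuel → ∀ memo, MInv cost n memo →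
      (bbest cost n fuel rem memo).1 = mbest cost n rem ∧
        MInv cost n (bbest cost n fuel rem memo).2 := by
  intro fuel
  induction fuel with
  | zero =>
      intro rem hlen memo hm
      have hnil : rem = [] := by
        cases rem with
        | nil => rfl
        | cons t ts => simp at hlen
      subst hnil
      rw [bbest]
      exact ⟨(mbest_nil cost n).symm, hm⟩
  | succ fuel ih =>
      intro rem hlen memo hm
      by_cases hie : rem.isEmpty
      · have hnil : rem = [] := List.isEmpty_iff.mp hie
        rw [bbest, hie]
        subst hnil
        exact ⟨(mbest_nil cost n).symm, hm⟩
      · have hie' : rem.isEmpty = false := Bool.not_eq_true _ ▸ Bool.eq_false_iff.mpr hie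
        have hbv : ∀ (todo : List Int) (i : Nat) (h : i + todo.length = rem.length)
            (memo' : PySem.Dict (List Int) Int), MInv cost n memo' →
            (bvalsF cost n (bbest cost n fuel) rem todo i memo').1 = mvals cost n rem todo i h ∧
              MInv cost n (bvalsF cost n (bbest cost n fuel) rem todo i memo').2 := by
          intro todo
          induction todo with
          | nil => intro i h memo' hm'; rw [bvalsF, mvals]; exact ⟨rfl, hm'⟩
          | cons t ts iht =>
              intro i h memo' hm'
              have hi : i < rem.length := by simp only [List.length_cons] at h; omega
              have hq := ih (rem.eraseIdx i)
                (by rw [List.length_eraseIdx_of_lt hi]; omega) memo' hm'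
              have hr := iht (i + 1) (by simp only [List.length_cons] at h; omega)
                (bbest cost n fuel (rem.eraseIdx i) memo').2 hq.2
              rw [bvalsF, mvals]
              refine ⟨?_, hr.2⟩
              simp only [List.cons.injEq]
              exact ⟨by rw [hq.1], hr.1⟩
        rw [bbest, hie']
        simp only [Bool.false_eq_true, if_false]
        cases hget : PySem.Dict.get? memo rem with
        | some v =>
            simp only []
            exact ⟨hm rem v hget, hm⟩
        | none =>
            simp only []
            obtain ⟨hv1, hv2⟩ := hbv rem 0 (by simp) memo hm
            have hbval : (match PySem.List.min?
                  (bvalsF cost n (bbest cost n fuel) rem rem 0 memo).1 (fun x => x) with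
                | some m => m | none => 0) = mbest cost n rem := by
              rw [hv1]
              conv_rhs => rw [mbest, hie']
              simp only [Bool.false_eq_true, if_false]
            rw [hbval]
            refine ⟨rfl, ?_⟩
            intro k v hkv
            rw [PySem.Dict.get?_insert] at hkv
            by_cases hk : k = rem
            · rw [if_pos hk] at hkv
              cases hkv
              rw [hk]
            · rw [if_neg hk] at hkv
              exact hv2 k v hkv

-- the memoized reconstruction computes mbuild and preserves the invariant
lemma bbuild_eq (cost : List (List Int)) (n : Int) :
    ∀ (fuel : Nat) (rem : List Int), rem.length ≤ fuel → ∀ memo, MInv cost n memo →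
      (bbuild cost n fuel rem memo).1 = mbuild cost n rem ∧
        MInv cost n (bbuild cost n fuel rem memo).2 := by
  intro fuel
  induction fuel with
  | zero =>
      intro rem hlen memo hm
      have hnil : rem = [] := by
        cases rem with
        | nil => rfl
        | cons t ts => simp at hlen
      subst hnil
      rw [bbuild, mbuild]
      exact ⟨rfl, hm⟩
  | succ fuel ih =>
      intro rem hlen memo hm
      by_cases hie : rem.isEmpty
      · rw [bbuild, hie, mbuild, hie]
        exact ⟨rfl, hm⟩
      · have hie' : rem.isEmpty = false := Bool.not_eq_true _ ▸ Bool.eq_false_iff.mpr hie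
        have hbo : ∀ (todo : List Int) (i : Nat) (h : i + todo.length = rem.length) (b : Int)
            (memo' : PySem.Dict (List Int) Int), MInv cost n memo' →
            (boutsF cost n (bbest cost n fuel) (bbuild cost n fuel) rem b todo i memo').1
                = mouts cost n rem todo i b h ∧
              MInv cost n
                (boutsF cost n (bbest cost n fuel) (bbuild cost n fuel) rem b todo i memo').2 := by
          intro todo
          induction todo with
          | nil => intro i h b memo' hm'; rw [boutsF, mouts]; exact ⟨rfl, hm'⟩
          | cons t ts iht =>
              intro i h b memo' hm'
              have hi : i < rem.length := by simp only [List.length_cons] at h; omega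
              have hel : (rem.eraseIdx i).length ≤ fuel := by
                rw [List.length_eraseIdx_of_lt hi]; omega
              have hq := bbest_eq cost n fuel (rem.eraseIdx i) hel memo' hm'
              rw [boutsF, mouts]
              simp only [hq.1]
              by_cases hcond :
                  (pvC cost t (n - (rem.length : Int)) + mbest cost n (rem.eraseIdx i) == b) = true
              · simp only [hcond, if_true]
                have hb := ih (rem.eraseIdx i) hel
                  (bbest cost n fuel (rem.eraseIdx i) memo').2 hq.2
                have hr := iht (i + 1) (by simp only [List.length_cons] at h; omega) b
                  (bbuild cost n fuel (rem.eraseIdx i)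
                    (bbest cost n fuel (rem.eraseIdx i) memo').2).2 hb.2
                refine ⟨?_, hr.2⟩
                rw [hb.1, hr.1]
              · simp only [hcond]
                have hr := iht (i + 1) (by simp only [List.length_cons] at h; omega) b
                  (bbest cost n fuel (rem.eraseIdx i) memo').2 hq.2
                refine ⟨?_, hr.2⟩
                simpa using hr.1
        have hq := bbest_eq cost n (fuel + 1) rem hlen memo hm
        rw [bbuild, hie']
        simp only [Bool.false_eq_true, if_false, hq.1]
        have := hbo rem 0 (by simp) (mbest cost n rem) (bbest cost n (fuel + 1) rem memo).2 hq.2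
        refine ⟨?_, this.2⟩
        rw [this.1]
        conv_rhs => rw [mbuild, hie']
        simp only [Bool.false_eq_true, if_false]

-- ===== A-side: Python min over (cost, perm) pairs =====
def pvStep2 (acc : Option (Int × List Int)) (y : Int × List Int) : Option (Int × List Int) :=
  match acc with
  | none => some y
  | some m =>
      if (decide (y.1 < m.1) || !decide (m.1 < y.1) && decide (y.2 < m.2)) = true
      then some y else some m

lemma pv_min2_eq (x : Int × List Int) (t : List (Int × List Int)) :
    PySem.List.min2? (x :: t) (fun sp => sp.1) (fun sp => sp.2) = t.foldl pvStep2 (some x) := by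
  unfold PySem.List.min2?
  rw [List.foldl_cons]
  show List.foldl _ (some x) t = _
  exact List.foldl_ext _ _ _ (fun acc y _ => by cases acc <;> rfl)

-- the first component of Python's min over (cost, perm) pairs is the running min of costs
lemma pv_min2_fold_fst :
    ∀ (t : List (Int × List Int)) (m : Int × List Int),
      ∃ r, t.foldl pvStep2 (some m) = some r ∧ r.1 = t.foldl (fun a y => min a y.1) m.1 := by
  intro t
  induction t with
  | nil => intro m; exact ⟨m, rfl, rfl⟩
  | cons y s ih =>
      intro m
      simp only [List.foldl_cons]
      by_cases hcond :
          (decide (y.1 < m.1) || !decide (m.1 < y.1) && decide (y.2 < m.2)) = true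
      · obtain ⟨r, hr, hfst⟩ := ih y
        refine ⟨r, by rw [show pvStep2 (some m) y = some y by simp [pvStep2, hcond]]; exact hr, ?_⟩
        have hmin : min m.1 y.1 = y.1 := by
          rcases Bool.or_eq_true_iff.mp hcond with h | h
          · have := of_decide_eq_true h; omega
          · have h1 := (Bool.and_eq_true_iff.mp h).1
            have : ¬ m.1 < y.1 := by intro hlt; simp [hlt] at h1
            omega
        rw [hfst, hmin]
      · obtain ⟨r, hr, hfst⟩ := ih m
        refine ⟨r, by rw [show pvStep2 (some m) y = some m by simp [pvStep2, hcond]]; exact hr, ?_⟩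
        have hnot : ¬ y.1 < m.1 := by intro hlt; exact hcond (by simp [hlt])
        have hmin : min m.1 y.1 = m.1 := by omega
        rw [hfst, hmin]

-- ===== VERDICT =====
theorem assignment_spec : Claim_equal_assignment := by
  intro cost _ _
  simp only [Spec_assignment, assignment, assignment_alt]
  set n : Int := (cost.length : Int) with hn
  set rng := PySem.List.pyRange 0 n 1 with hrng
  have hlen : rng.length = cost.length := by
    rw [hrng, PySem.List.length_pyRange_one]
    simp [hn]
  have ha0 : n - (rng.length : Int) = 0 := by rw [hlen, hn]; omega
  have hempty : MInv cost n PySem.Dict.empty := by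
    intro k v hkv
    rw [PySem.Dict.get?_empty] at hkv
    cases hkv
  have hB : (bbuild cost n rng.length rng PySem.Dict.empty).1
      = (PySem.List.permutations rng rng.length).filter
          (fun p => scost cost 0 p == mbest cost n rng) := by
    rw [(bbuild_eq cost n rng.length rng le_rfl PySem.Dict.empty hempty).1,
        mbuild_eq cost n rng.length rng rfl, ha0]
  rw [hB]
  obtain ⟨pw, hpw, hcw⟩ := mbest_att cost n rng.length rng rfl
  rw [ha0] at hcw
  cases hps : PySem.List.permutations rng rng.length with
  | nil => rw [hps] at hpw; cases hpw
  | cons p t =>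
      rw [hps] at hpw
      simp only [List.map_cons]
      rw [pv_min2_eq]
      obtain ⟨r, hr, hfst⟩ :=
        pv_min2_fold_fst (t.map (fun perm => (pvCost cost perm, perm))) (pvCost cost p, p)
      rw [hr]
      rw [List.foldl_map] at hfst
      have hfold : r.1 = (t.map (pvCost cost)).foldl min (pvCost cost p) := by
        rw [hfst, List.foldl_map]
      -- r.1 is the minimum cost: it equals mbest
      have hmem : r.1 ∈ (p :: t).map (pvCost cost) := by
        rcases PySem.List.foldl_min_mem (t.map (pvCost cost)) (pvCost cost p) with h1 | h1
        · rw [List.map_cons, hfold, h1]; exact List.mem_cons_self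
        · rw [List.map_cons]; exact List.mem_cons_of_mem _ (by rw [hfold]; exact h1)
      have hlbm : ∀ y ∈ (p :: t).map (pvCost cost), r.1 ≤ y := by
        intro y hy
        rw [List.map_cons] at hy
        rcases List.mem_cons.mp hy with h1 | h1
        · rw [h1, hfold]; exact (PySem.List.foldl_min_le _ _).1
        · rw [hfold]; exact (PySem.List.foldl_min_le _ _).2 y h1
      have hmle : mbest cost n rng ≤ r.1 := by
        obtain ⟨q, hq, hqc⟩ := List.mem_map.mp hmem
        have := mbest_lb cost n rng.length rng rfl q (by rw [hps]; exact hq)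
        rw [ha0, ← pvCost_eq_scost, hqc] at this
        exact this
      have hlem : r.1 ≤ mbest cost n rng := by
        have := hlbm (pvCost cost pw) (List.mem_map_of_mem hpw)
        rw [pvCost_eq_scost, hcw] at this
        exact this
      have hm : r.1 = mbest cost n rng := le_antisymm hlem hmle
      simp only []
      have hmc : (pvCost cost p, p) :: List.map (fun perm => (pvCost cost perm, perm)) t
          = List.map (fun perm => (pvCost cost perm, perm)) (p :: t) := rfl
      rw [hmc, List.filter_map, List.map_map]
      have hcomp : ((fun sp : Int × List Int => sp.2) ∘ fun perm => (pvCost cost perm, perm))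
          = id := rfl
      rw [hcomp, List.map_id]
      apply List.filter_congr
      intro q _
      simp only [Function.comp_apply]
      rw [pvCost_eq_scost, hm]
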